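-- pv_equiv track=rewrite | github.com/Alex-Andrv/thesis_experiments | Victor_Kondratiev/LEC_by_two_circuits.py | get_bench_header
-- ===== SOURCE A (Python) =====
-- def get_bench_header(bench):
--   bench_testname = ''
--   nof_inputs = 0
--   nof_outputs = 0
--   nof_and_gates = 0
--   nof_not_gates = 0
--   i = 0
--   while i < len(bench):
--     line = bench[i]
--     if len(line) == 0:
--       del bench[i]
--     elif line[0] == '#':
--       if 'testname' in line:
--         bench_testname = line.split()[-1]
--       elif 'input' in line:
--         nof_inputs = int(line.split()[-1])
--       elif 'output' in line:
--         nof_outputs = int(line.split()[-1])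
--       elif 'not' in line:
--         nof_not_gates = int(line.split()[-1])
--       elif 'and' in line:
--         nof_and_gates = int(line.split()[-1])
--       del bench[i]
--     else:
--       i += 1
--   return bench, bench_testname, nof_inputs, nof_outputs, nof_and_gates, nof_not_gates
-- ===== SOURCE B (Python) =====
-- def get_bench_header(bench):
--     # phase 1: collect the comment lines, then rebuild bench in place without blank/comment lines
--     comments = [l for l in bench if l and l[0] == '#']
--     bench[:] = [l for l in bench if l and l[0] != '#']
--
--     def owner(line):
--         # the keyword whose branch would claim this comment line (priority order)
--         for kw in ('testname', 'input', 'output', 'not', 'and'):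
--             if kw in line:
--                 return kw
--         return None
--
--     def last(kw, conv, default):
--         # last comment line owned by kw wins; searched back to front
--         for line in reversed(comments):
--             if owner(line) == kw:
--                 return conv(line.split()[-1])
--         return default
--
--     return (bench, last('testname', str, ''), last('input', int, 0),
--             last('output', int, 0), last('and', int, 0), last('not', int, 0))
-- ===== Notes on version B (the rewrite author's own statement) =====
-- stated objective: alternative
-- what changed: Replaces A's index/delete while-loop with two filter comprehensions (comments vs kept lines) plus an independent per-field backward search (last owned comment wins) instead of a single forward if/elif state-updating pass.
import Mathlib
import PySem

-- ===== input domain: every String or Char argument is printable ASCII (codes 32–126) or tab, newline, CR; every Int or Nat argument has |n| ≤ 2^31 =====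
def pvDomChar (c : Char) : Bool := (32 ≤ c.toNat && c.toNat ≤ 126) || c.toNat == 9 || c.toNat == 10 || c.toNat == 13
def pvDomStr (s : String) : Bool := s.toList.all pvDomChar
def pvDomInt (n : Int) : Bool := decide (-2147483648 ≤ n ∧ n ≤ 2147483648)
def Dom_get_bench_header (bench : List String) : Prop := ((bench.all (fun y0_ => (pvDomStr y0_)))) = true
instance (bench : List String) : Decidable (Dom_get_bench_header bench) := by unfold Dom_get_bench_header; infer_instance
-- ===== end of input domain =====

-- B replaces A's index/delete while-loop by two filters plus a per-field backward search
-- (different decomposition, same return value); A also mutates bench in place — the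
-- equivalence proved here is about the RETURN value only (B performs the same mutation in Python).


-- shared trivial primitives: line.split()[-1] and int(line.split()[-1]) (total form; Pre_ guards the int)
def pvTok (line : String) : String := PySem.List.pyGetD (PySem.Str.split₀ line) (-1) ""
def pvInt (line : String) : Int := (PySem.Int.ofStr? (pvTok line)).getD 0

-- ===== PORT A =====
-- the while-loop: kept lines accumulate (i only advances past them), blank/comment lines are dropped
def pvLoopA : List String → List String → String → Int → Int → Int → Int →
    List String × String × Int × Int × Int × Int
  | kept, [], tn, ni, no, na, nn => (kept, tn, ni, no, na, nn)
  | kept, line :: rest, tn, ni, no, na, nn =>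
    if PySem.Str.len line = 0 then pvLoopA kept rest tn ni no na nn
    else if PySem.Str.pyGet? line 0 = some '#' then
      if PySem.Str.isIn "testname" line then pvLoopA kept rest (pvTok line) ni no na nn
      else if PySem.Str.isIn "input" line then pvLoopA kept rest tn (pvInt line) no na nn
      else if PySem.Str.isIn "output" line then pvLoopA kept rest tn ni (pvInt line) na nn
      else if PySem.Str.isIn "not" line then pvLoopA kept rest tn ni no na (pvInt line)
      else if PySem.Str.isIn "and" line then pvLoopA kept rest tn ni no (pvInt line) nn
      else pvLoopA kept rest tn ni no na nn
    else pvLoopA (kept ++ [line]) rest tn ni no na nn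

def get_bench_header (bench : List String) : List String × String × Int × Int × Int × Int :=
  pvLoopA [] bench "" 0 0 0 0

-- ===== PORT B =====
def pvIsComment (l : String) : Bool :=
  !(PySem.Str.len l == 0) && (PySem.Str.pyGet? l 0 == some '#')

def pvKeep (l : String) : Bool :=
  !(PySem.Str.len l == 0) && !(PySem.Str.pyGet? l 0 == some '#')

-- owner: the keyword whose branch would claim this comment line (priority order)
def pvOwner (line : String) : Option String :=
  (["testname", "input", "output", "not", "and"] : List String).find?
    (fun kw => PySem.Str.isIn kw line)

-- last comment line owned by kw, searched back to front
def pvLastOwned (comments : List String) (kw : String) : Option String :=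
  comments.reverse.find? (fun l => pvOwner l == some kw)

def pvLastStr (comments : List String) (kw : String) (d : String) : String :=
  match pvLastOwned comments kw with
  | some l => pvTok l
  | none => d

def pvLastInt (comments : List String) (kw : String) (d : Int) : Int :=
  match pvLastOwned comments kw with
  | some l => pvInt l
  | none => d

def get_bench_header_alt (bench : List String) : List String × String × Int × Int × Int × Int :=
  let comments := bench.filter pvIsComment
  let kept := bench.filter pvKeep
  (kept, pvLastStr comments "testname" "", pvLastInt comments "input" 0,
   pvLastInt comments "output" 0, pvLastInt comments "and" 0, pvLastInt comments "not" 0)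

-- ===== PRECONDITION & SPEC =====
-- Pre_ excludes exactly the inputs on which Python A raises ValueError: a comment line whose
-- first matching keyword is an int field (input/output/not/and) but whose last token is not an int literal.
def Pre_get_bench_header (bench : List String) : Prop :=
  ∀ l ∈ bench, pvIsComment l = true → (pvOwner l).isSome = true →
    pvOwner l ≠ some "testname" → (PySem.Int.ofStr? (pvTok l)).isSome = true
instance (bench : List String) : Decidable (Pre_get_bench_header bench) := by
  unfold Pre_get_bench_header; infer_instance

def pvWitness_get_bench_header : List String :=
  ["# testname c1", "", "# inputs 3", "# output 2", "G1 = AND(a, b)", "# not 1", "# and 4"]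

def Spec_get_bench_header (bench : List String) (out : List String × String × Int × Int × Int × Int) : Prop := out = get_bench_header_alt bench
instance (bench : List String) (out : List String × String × Int × Int × Int × Int) : Decidable (Spec_get_bench_header bench out) := by unfold Spec_get_bench_header; infer_instance

-- ===== CLAIM (what is proved, stated in full; the proofs are below) =====
def Claim_equal_get_bench_header : Prop := ∀ (bench : List String), Dom_get_bench_header bench → Pre_get_bench_header bench → Spec_get_bench_header bench (get_bench_header bench)

-- ===== LEMMAS AND PROOFS =====

theorem pvLastOwned_cons (c : String) (cs : List String) (kw : String) :
    pvLastOwned (c :: cs) kw =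
      (pvLastOwned cs kw).or (if pvOwner c == some kw then some c else none) := by
  simp [pvLastOwned, List.find?_append]

theorem pvLastStr_cons (c : String) (cs : List String) (kw d : String) :
    pvLastStr (c :: cs) kw d =
      pvLastStr cs kw (if pvOwner c = some kw then pvTok c else d) := by
  unfold pvLastStr
  rw [pvLastOwned_cons]
  cases h : pvLastOwned cs kw <;> by_cases ho : pvOwner c = some kw <;>
    simp [Option.or, ho]

theorem pvLastInt_cons (c : String) (cs : List String) (kw : String) (d : Int) :
    pvLastInt (c :: cs) kw d =
      pvLastInt cs kw (if pvOwner c = some kw then pvInt c else d) := by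
  unfold pvLastInt
  rw [pvLastOwned_cons]
  cases h : pvLastOwned cs kw <;> by_cases ho : pvOwner c = some kw <;>
    simp [Option.or, ho]

-- the loop invariant: A's single forward pass equals kept-prefix ++ filter plus per-field last-owned updates
theorem pvLoopA_eq (rest kept : List String) (tn : String) (ni no na nn : Int) :
    pvLoopA kept rest tn ni no na nn =
      (kept ++ rest.filter pvKeep,
       pvLastStr (rest.filter pvIsComment) "testname" tn,
       pvLastInt (rest.filter pvIsComment) "input" ni,
       pvLastInt (rest.filter pvIsComment) "output" no,
       pvLastInt (rest.filter pvIsComment) "and" na,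
       pvLastInt (rest.filter pvIsComment) "not" nn) := by
  induction rest generalizing kept tn ni no na nn with
  | nil => simp [pvLoopA, pvLastStr, pvLastInt, pvLastOwned]
  | cons line rest ih =>
    by_cases h0 : PySem.Str.len line = 0
    · have he : line = "" := by simpa [pysem] using h0
      subst he
      have hc : pvIsComment "" = false := by decide
      have hk : pvKeep "" = false := by decide
      simp [pvLoopA, hc, hk, ih]
    · by_cases hH : PySem.Str.pyGet? line 0 = some '#'
      · have hne : ¬ line = "" := fun e => h0 (by rw [e]; decide)
        have hH' : PySem.List.pyGet? line.toList 0 = some '#' := by simpa using hH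
        have hc : pvIsComment line = true := by simp [pvIsComment, hne, hH']
        have hk : pvKeep line = false := by simp [pvKeep, hH']
        rw [pvLoopA]
        simp only [if_neg h0, if_pos hH]
        rw [List.filter_cons_of_pos hc, List.filter_cons_of_neg (by simp [hk]),
            pvLastStr_cons, pvLastInt_cons, pvLastInt_cons, pvLastInt_cons, pvLastInt_cons]
        by_cases h1 : PySem.Str.isIn "testname" line = true
        · have h1' : PySem.Chars.isIn ['t', 'e', 's', 't', 'n', 'a', 'm', 'e'] line.toList = true := by simpa using h1
          have ho : pvOwner line = some "testname" := by simp [pvOwner, List.find?, h1']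
          simp [h1', ho, ih]
        · have h1' : PySem.Chars.isIn ['t', 'e', 's', 't', 'n', 'a', 'm', 'e'] line.toList = false := by
            simpa using h1
          by_cases h2 : PySem.Str.isIn "input" line = true
          · have h2' : PySem.Chars.isIn ['i', 'n', 'p', 'u', 't'] line.toList = true := by simpa using h2
            have ho : pvOwner line = some "input" := by simp [pvOwner, List.find?, h1', h2']
            simp [h1', h2', ho, ih]
          · have h2' : PySem.Chars.isIn ['i', 'n', 'p', 'u', 't'] line.toList = false := by simpa using h2
            by_cases h3 : PySem.Str.isIn "output" line = true
            · have h3' : PySem.Chars.isIn ['o', 'u', 't', 'p', 'u', 't'] line.toList = true := by simpa using h3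
              have ho : pvOwner line = some "output" := by
                simp [pvOwner, List.find?, h1', h2', h3']
              simp [h1', h2', h3', ho, ih]
            · have h3' : PySem.Chars.isIn ['o', 'u', 't', 'p', 'u', 't'] line.toList = false := by
                simpa using h3
              by_cases h4 : PySem.Str.isIn "not" line = true
              · have h4' : PySem.Chars.isIn ['n', 'o', 't'] line.toList = true := by simpa using h4
                have ho : pvOwner line = some "not" := by
                  simp [pvOwner, List.find?, h1', h2', h3', h4']
                simp [h1', h2', h3', h4', ho, ih]
              · have h4' : PySem.Chars.isIn ['n', 'o', 't'] line.toList = false := by simpa using h4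
                by_cases h5 : PySem.Str.isIn "and" line = true
                · have h5' : PySem.Chars.isIn ['a', 'n', 'd'] line.toList = true := by
                    simpa using h5
                  have ho : pvOwner line = some "and" := by
                    simp [pvOwner, List.find?, h1', h2', h3', h4', h5']
                  simp [h1', h2', h3', h4', h5', ho, ih]
                · have h5' : PySem.Chars.isIn ['a', 'n', 'd'] line.toList = false := by
                    simpa using h5
                  have ho : pvOwner line = none := by
                    simp [pvOwner, List.find?, h1', h2', h3', h4', h5']
                  simp [h1', h2', h3', h4', h5', ho, ih]
      · have hne : ¬ line = "" := fun e => h0 (by rw [e]; decide)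
        have hH' : ¬ PySem.List.pyGet? line.toList 0 = some '#' := by simpa using hH
        have hc : pvIsComment line = false := by simp [pvIsComment, hH']
        have hk : pvKeep line = true := by simp [pvKeep, hne, hH']
        rw [pvLoopA]
        simp only [if_neg h0, if_neg hH]
        rw [ih, List.filter_cons_of_pos hk, List.filter_cons_of_neg (by simp [hc])]
        simp

-- ===== VERDICT (by name: the statement is the Claim_ definition above) =====
theorem get_bench_header_spec : Claim_equal_get_bench_header := by
  intro bench _ _
  unfold Spec_get_bench_header get_bench_header get_bench_header_alt
  rw [pvLoopA_eq]
  simp
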